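-- pv_equiv track=rewrite | github.com/imn00133/algorithm | BaekJoonOnlineJudge/500BruteForce/Main/baekjoon_3085.py | all_line_count_candy
-- ===== SOURCE A (Python) =====
-- def line_count_candy(line):
--     count_list = []
--     count = 1
--     for index in range(1, len(line)):
--         if line[index] == line[index - 1]:
--             count += 1
--         else:
--             count_list.append(count)
--             count = 1
--     count_list.append(count)
--     return max(count_list)
--
-- def make_column_line(board, x):
--     line = []
--     for y in range(len(board)):
--         line.append(board[y][x])
--     return line
--
-- def all_line_count_candy(board, mode):
--     candy_max_count_list = []
--     if mode == 'row':
--         for line in board: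
--             candy_max_count_list.append(line_count_candy(line))
--     elif mode == 'column':
--         for x in range(len(board)):
--             candy_max_count_list.append(line_count_candy(make_column_line(board, x)))
--     return candy_max_count_list
-- ===== SOURCE B (Python) =====
-- def all_line_count_candy(board, mode):
--     if mode == 'row':
--         lines = board
--     elif mode == 'column':
--         lines = [[row[x] for row in board] for x in range(len(board))]
--     else:
--         lines = []
--     return [_max_run_by_cuts(line) for line in lines]
--
--
-- def _max_run_by_cuts(line):
--     # boundary positions: start, every index where the candy changes, end;
--     # a maximal run is exactly the span between consecutive boundaries,
--     # and a run is never shorter than 1.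
--     n = len(line)
--     bounds = [0] + [i for i in range(1, n) if line[i] != line[i - 1]] + [n]
--     return max(max(b - a for a, b in zip(bounds, bounds[1:])), 1)
-- ===== Notes on version B (the rewrite author's own statement) =====
-- stated objective: alternative
-- what changed: B computes the list of run-boundary positions (indices where adjacent candies differ, plus the two ends) and returns the maximum difference of consecutive boundaries, instead of A's counter-accumulating pass that builds a run-length list; columns come from a comprehension transpose instead of an index-appending helper.
import Mathlib
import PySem

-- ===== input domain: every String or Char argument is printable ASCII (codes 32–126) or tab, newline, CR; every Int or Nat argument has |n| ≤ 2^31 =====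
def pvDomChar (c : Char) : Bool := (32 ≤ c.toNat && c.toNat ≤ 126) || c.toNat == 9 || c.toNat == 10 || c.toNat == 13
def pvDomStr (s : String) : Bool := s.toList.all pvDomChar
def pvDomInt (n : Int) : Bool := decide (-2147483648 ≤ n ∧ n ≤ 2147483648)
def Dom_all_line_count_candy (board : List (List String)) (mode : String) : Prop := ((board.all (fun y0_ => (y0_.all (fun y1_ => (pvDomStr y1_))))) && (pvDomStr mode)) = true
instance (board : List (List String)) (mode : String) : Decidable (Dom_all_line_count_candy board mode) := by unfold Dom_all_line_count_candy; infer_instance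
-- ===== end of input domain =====

-- B finds run-boundary positions and maximises their consecutive differences, instead of A's
-- counter-accumulating pass building a run-length list (objective: alternative decomposition).
-- ===== PORT A =====
def line_count_candy (line : List String) : Int :=
  -- count_list/count threaded through the index loop; max over the nonempty final list
  let st := (PySem.List.pyRange 1 (line.length : Int) 1).foldl
    (fun (st : List Int × Int) index =>
      if PySem.List.pyGetD line index "" = PySem.List.pyGetD line (index - 1) "" then
        (st.1, st.2 + 1)
      else
        (st.1 ++ [st.2], 1)) ([], 1)
  -- count_list.append(count); max(count_list) — the list is nonempty, so Python's max never raises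
  (PySem.List.max? (st.1 ++ [st.2]) (fun v => v)).getD 0

def make_column_line (board : List (List String)) (x : Int) : List String :=
  -- board[y][x] is in range under Pre_all_line_count_candy; pyGetD's default is never used there
  (PySem.List.pyRange 0 (board.length : Int) 1).foldl
    (fun line y => line ++ [PySem.List.pyGetD (PySem.List.pyGetD board y []) x ""]) []

def all_line_count_candy (board : List (List String)) (mode : String) : List Int :=
  if mode = "row" then
    board.foldl (fun acc line => acc ++ [line_count_candy line]) []
  else if mode = "column" then
    (PySem.List.pyRange 0 (board.length : Int) 1).foldl
      (fun acc x => acc ++ [line_count_candy (make_column_line board x)]) []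
  else []

-- ===== PORT B =====
def pvMaxRunByCuts (line : List String) : Int :=
  let n : Int := (line.length : Int)
  let bounds : List Int :=
    0 :: (PySem.List.pyRange 1 n 1).filter
      (fun i => !(PySem.List.pyGetD line i "" == PySem.List.pyGetD line (i - 1) "")) ++ [n]
  max ((PySem.List.max? (List.zipWith (fun a b => b - a) bounds bounds.tail) (fun v => v)).getD 0) 1

def all_line_count_candy_alt (board : List (List String)) (mode : String) : List Int :=
  let lines :=
    if mode = "row" then board
    else if mode = "column" then
      (PySem.List.pyRange 0 (board.length : Int) 1).map
        (fun x => board.map (fun row => PySem.List.pyGetD row x ""))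
    else []
  lines.map pvMaxRunByCuts

-- ===== PRECONDITION & SPEC =====
-- Pre_ excludes exactly the inputs where Python A raises IndexError: column mode on a board
-- with a row shorter than the board's height (board[y][x] out of range).
def Pre_all_line_count_candy (board : List (List String)) (mode : String) : Prop :=
  mode = "column" → ∀ row ∈ board, board.length ≤ row.length
instance (board : List (List String)) (mode : String) : Decidable (Pre_all_line_count_candy board mode) := by
  unfold Pre_all_line_count_candy; infer_instance
def pvWitness_all_line_count_candy : List (List String) × String :=
  ([["a", "b"], ["a", "a"]], "column")

def Spec_all_line_count_candy (board : List (List String)) (mode : String) (out : List Int) : Prop := out = all_line_count_candy_alt board mode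
instance (board : List (List String)) (mode : String) (out : List Int) : Decidable (Spec_all_line_count_candy board mode out) := by unfold Spec_all_line_count_candy; infer_instance

-- ===== CLAIM (what is proved, stated in full; the proofs are below) =====
def Claim_equal_all_line_count_candy : Prop := ∀ (board : List (List String)) (mode : String), Dom_all_line_count_candy board mode → Pre_all_line_count_candy board mode → Spec_all_line_count_candy board mode (all_line_count_candy board mode)

-- ===== LEMMAS AND PROOFS =====

-- A's loop state, rewritten as structural recursion on the tail of the line
def runsAux (prev : String) (l : List String) (cl : List Int) (c : Int) : List Int × Int :=
  match l with
  | [] => (cl, c)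
  | x :: xs => if x = prev then runsAux x xs cl (c + 1) else runsAux x xs (cl ++ [c]) 1

-- B's cut positions (indices where the line changes), as structural recursion
def cutsR (p : Int) (prev : String) (l : List String) : List Int :=
  match l with
  | [] => []
  | x :: xs => if x = prev then cutsR (p + 1) x xs else p :: cutsR (p + 1) x xs

-- differences of consecutive elements, seeded with a left end
def gapList (a : Int) (l : List Int) : List Int :=
  match l with
  | [] => []
  | b :: bs => (b - a) :: gapList b bs

lemma foldl_max_comm (cl : List Int) (a b : Int) :
    List.foldl max (max a b) cl = max a (List.foldl max b cl) := by
  induction cl generalizing b with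
  | nil => rfl
  | cons x t ih => simp only [List.foldl_cons, max_assoc, ih]

lemma le_foldl_max (cl : List Int) (c : Int) : c ≤ List.foldl max c cl := by
  induction cl generalizing c with
  | nil => simp
  | cons x t ih => exact le_trans (le_max_left c x) (ih _)

lemma foldA_eq (xs : List String) : ∀ (pre : List String) (x : String) (cl : List Int) (c : Int),
    (PySem.List.pyRange ((pre.length + 1 : Nat) : Int) ((pre.length + 1 + xs.length : Nat) : Int) 1).foldl
      (fun (st : List Int × Int) index =>
        if PySem.List.pyGetD (pre ++ x :: xs) index "" = PySem.List.pyGetD (pre ++ x :: xs) (index - 1) "" then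
          (st.1, st.2 + 1)
        else
          (st.1 ++ [st.2], 1)) (cl, c)
    = runsAux x xs cl c := by
  induction xs with
  | nil =>
    intro pre x cl c
    rw [PySem.List.pyRange_one_eq_nil (by simp)]
    rfl
  | cons y ys ih =>
    intro pre x cl c
    rw [PySem.List.pyRange_one_cons (by simp), List.foldl_cons]
    have hy : PySem.List.pyGetD (pre ++ x :: y :: ys) ((pre.length + 1 : Nat) : Int) "" = y := by
      rw [PySem.List.pyGetD_natCast]
      simp [List.getD_eq_getElem?_getD]
    have hx : PySem.List.pyGetD (pre ++ x :: y :: ys) (((pre.length + 1 : Nat) : Int) - 1) "" = x := by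
      have hc : (((pre.length + 1 : Nat) : Int) - 1) = ((pre.length : Nat) : Int) := by push_cast; omega
      rw [hc, PySem.List.pyGetD_natCast]
      simp [List.getD_eq_getElem?_getD]
    rw [hy, hx]
    have hL : pre ++ x :: y :: ys = (pre ++ [x]) ++ y :: ys := by simp
    have h1 : ((pre.length + 1 : Nat) : Int) + 1 = (((pre ++ [x]).length + 1 : Nat) : Int) := by
      simp
    have h2 : ((pre.length + 1 + (y :: ys).length : Nat) : Int)
        = (((pre ++ [x]).length + 1 + ys.length : Nat) : Int) := by
      simp; omega
    by_cases h : y = x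
    · rw [if_pos h, hL, h1, h2, ih (pre ++ [x]) y cl (c + 1)]
      try simp [runsAux, h]
    · rw [if_neg h, hL, h1, h2, ih (pre ++ [x]) y (cl ++ [c]) 1]
      try simp [runsAux, h]

lemma filterB_eq (xs : List String) : ∀ (pre : List String) (x : String),
    (PySem.List.pyRange ((pre.length + 1 : Nat) : Int) ((pre.length + 1 + xs.length : Nat) : Int) 1).filter
      (fun i => !(PySem.List.pyGetD (pre ++ x :: xs) i "" == PySem.List.pyGetD (pre ++ x :: xs) (i - 1) ""))
    = cutsR ((pre.length + 1 : Nat) : Int) x xs := by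
  induction xs with
  | nil =>
    intro pre x
    rw [PySem.List.pyRange_one_eq_nil (by simp)]
    rfl
  | cons y ys ih =>
    intro pre x
    rw [PySem.List.pyRange_one_cons (by simp), List.filter_cons]
    have hy : PySem.List.pyGetD (pre ++ x :: y :: ys) ((pre.length + 1 : Nat) : Int) "" = y := by
      rw [PySem.List.pyGetD_natCast]
      simp [List.getD_eq_getElem?_getD]
    have hx : PySem.List.pyGetD (pre ++ x :: y :: ys) (((pre.length + 1 : Nat) : Int) - 1) "" = x := by
      have hc : (((pre.length + 1 : Nat) : Int) - 1) = ((pre.length : Nat) : Int) := by push_cast; omega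
      rw [hc, PySem.List.pyGetD_natCast]
      simp [List.getD_eq_getElem?_getD]
    rw [hy, hx]
    have hL : pre ++ x :: y :: ys = (pre ++ [x]) ++ y :: ys := by simp
    have h1 : ((pre.length + 1 : Nat) : Int) + 1 = (((pre ++ [x]).length + 1 : Nat) : Int) := by
      simp
    have h2 : ((pre.length + 1 + (y :: ys).length : Nat) : Int)
        = (((pre ++ [x]).length + 1 + ys.length : Nat) : Int) := by
      simp; omega
    by_cases h : y = x
    · rw [hL, h1, h2, ih (pre ++ [x]) y]
      simp [cutsR, h]
    · rw [hL, h1, h2, ih (pre ++ [x]) y]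
      simp [cutsR, h]

-- the run-length list A accumulates IS the gap list of B's boundary positions
lemma runs_gap (xs : List String) : ∀ (x : String) (cl : List Int) (c p : Int),
    (runsAux x xs cl c).1 ++ [(runsAux x xs cl c).2]
      = cl ++ gapList (p - c) (cutsR p x xs ++ [p + (xs.length : Int)]) := by
  induction xs with
  | nil =>
    intro x cl c p
    simp only [runsAux, cutsR, List.nil_append, gapList]
    simp
  | cons y ys ih =>
    intro x cl c p
    by_cases h : y = x
    · simp only [runsAux, cutsR, if_pos h]
      rw [ih y cl (c + 1) (p + 1)]
      have h1 : p + 1 - (c + 1) = p - c := by ring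
      have h2 : p + 1 + ((ys.length : Nat) : Int) = p + (((y :: ys).length : Nat) : Int) := by
        push_cast [List.length_cons]; ring
      rw [h1, h2]
    · simp only [runsAux, cutsR, if_neg h]
      rw [ih y (cl ++ [c]) 1 (p + 1)]
      have h2 : p + 1 + ((ys.length : Nat) : Int) = p + (((y :: ys).length : Nat) : Int) := by
        push_cast [List.length_cons]; ring
      rw [h2]
      simp only [List.cons_append, gapList, List.append_assoc, List.nil_append]
      have h3 : p - (p - c) = c := by ring
      have h4 : p + 1 - 1 = p := by ring
      rw [h3, h4]

lemma zipWith_tail_eq_gapList (l : List Int) : ∀ (a : Int),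
    List.zipWith (fun a b => b - a) (a :: l) l = gapList a l := by
  induction l with
  | nil => intro a; rfl
  | cons b bs ih => intro a; simp only [List.zipWith_cons_cons, gapList, ih]

lemma runsAux_count_ge (xs : List String) : ∀ (x : String) (cl : List Int) (c : Int),
    1 ≤ c → 1 ≤ (runsAux x xs cl c).2 := by
  induction xs with
  | nil => intro x cl c hc; exact hc
  | cons y ys ih =>
    intro x cl c hc
    simp only [runsAux]
    by_cases h : y = x
    · rw [if_pos h]; exact ih y cl (c + 1) (by omega)
    · rw [if_neg h]; exact ih y (cl ++ [c]) 1 le_rfl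

lemma max_append_singleton (cl : List Int) (c : Int) :
    (PySem.List.max? (cl ++ [c]) (fun v => v)).getD 0 = List.foldl max c cl := by
  cases cl with
  | nil => simp [PySem.List.max?_id_cons]
  | cons a t =>
    rw [List.cons_append, PySem.List.max?_id_cons, Option.getD_some, List.foldl_append]
    simp only [List.foldl_cons, List.foldl_nil]
    rw [foldl_max_comm t c a]
    exact max_comm _ _

lemma column_eq (board : List (List String)) (x : Int) :
    (PySem.List.pyRange 0 (board.length : Int) 1).map
        (fun y => PySem.List.pyGetD (PySem.List.pyGetD board y []) x "")
      = board.map (fun row => PySem.List.pyGetD row x "") := by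
  conv_rhs => rw [← PySem.List.map_pyGetD_pyRange_zero' (xs := board) (d := [])]
  rw [List.map_map]
  rfl

lemma line_eq (line : List String) : line_count_candy line = pvMaxRunByCuts line := by
  cases line with
  | nil => decide
  | cons x xs =>
    unfold line_count_candy pvMaxRunByCuts
    have hA := foldA_eq xs [] x [] 1
    rw [show ([] : List String) ++ x :: xs = x :: xs from List.nil_append _] at hA
    simp only [List.length_nil] at hA
    rw [show ((0 + 1 : Nat) : Int) = 1 by norm_num,
      show ((0 + 1 + xs.length : Nat) : Int) = ((xs.length : Nat) : Int) + 1 by push_cast; omega] at hA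
    have hB := filterB_eq xs [] x
    rw [show ([] : List String) ++ x :: xs = x :: xs from List.nil_append _] at hB
    simp only [List.length_nil] at hB
    rw [show ((0 + 1 : Nat) : Int) = 1 by norm_num,
      show ((0 + 1 + xs.length : Nat) : Int) = ((xs.length : Nat) : Int) + 1 by push_cast; omega] at hB
    have hn : (((x :: xs).length : Nat) : Int) = ((xs.length : Nat) : Int) + 1 := by
      push_cast [List.length_cons]; ring
    have htail : (0 :: cutsR 1 x xs ++ [((xs.length : Nat) : Int) + 1]).tail
        = cutsR 1 x xs ++ [((xs.length : Nat) : Int) + 1] := rfl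
    simp only [hn, hB, hA, htail]
    rw [List.cons_append, zipWith_tail_eq_gapList (cutsR 1 x xs ++ [((xs.length : Nat) : Int) + 1]) 0]
    have hrg := runs_gap xs x [] 1 1
    rw [show (1 : Int) - 1 = 0 by ring, List.nil_append] at hrg
    rw [show (1 : Int) + ((xs.length : Nat) : Int) = ((xs.length : Nat) : Int) + 1 by ring] at hrg
    rw [← hrg]
    -- both sides are max? of the same nonempty list; the outer max-with-1 is harmless
    rw [max_append_singleton]
    have hge : 1 ≤ List.foldl max (runsAux x xs [] 1).2 (runsAux x xs [] 1).1 :=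
      le_trans (runsAux_count_ge xs x [] 1 le_rfl) (le_foldl_max _ _)
    omega

-- ===== VERDICT (by name: the statement is the Claim_ definition above) =====
theorem all_line_count_candy_spec : Claim_equal_all_line_count_candy := by
  intro board mode _ _
  unfold Spec_all_line_count_candy all_line_count_candy all_line_count_candy_alt
  split_ifs with h1 h2
  · simp only [PySem.List.foldl_append_singleton_eq_map, List.nil_append]
    exact List.map_congr_left (fun l _ => line_eq l)
  · simp only [PySem.List.foldl_append_singleton_eq_map, List.map_map, List.nil_append]
    refine List.map_congr_left (fun x _ => ?_)
    simp only [Function.comp, line_eq, make_column_line,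
      PySem.List.foldl_append_singleton_eq_map, List.nil_append]
    exact congrArg pvMaxRunByCuts (column_eq board x)
  · rfl
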